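-- pv_equiv track=rewrite | github.com/parasiitism/AlgoDaily | gcj/2019/qualification/b.py | findPath
-- ===== SOURCE A (Python) =====
-- def findLydiaPath(symbols):
--     i = 0
--     j = 0
--     res = [(i, j)]
--     for c in symbols:
--         if c == 'E':
--             i += 1
--         elif c == 'S':
--             j += 1
--         res.append((i, j))
--     return res
--
-- def findPath(n, symbols):
--     lydiaPath = findLydiaPath(symbols)
--     res = ""
--     count = 0
--     stack = [(0, 0, "")]
--     while len(stack) > 0:
--         i, j, c = stack.pop()
--         res += c
--         if (i, j) == (n-1, n-1):
--             break
--         if (i, j) == lydiaPath[count]: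
--             if symbols[count] == 'E':
--                 stack.append((i+1, j, 'S'))
--             elif symbols[count] == 'S':
--                 stack.append((i, j+1, 'E'))
--         else:
--             stack.append((i+1, j, 'S'))
--             stack.append((i, j+1, 'E'))
--         count += 1
--     return res
-- ===== SOURCE B (Python) =====
-- def findPath(n, symbols):
--     i = 0
--     j = 0
--     if (i, j) == (n - 1, n - 1):
--         return ""
--     out = []
--     for c in symbols:
--         if c == 'E':
--             i += 1
--             out.append('S')
--         elif c == 'S':
--             j += 1
--             out.append('E')
--         else:
--             break
--         if (i, j) == (n - 1, n - 1):
--             break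
--     return "".join(out)
-- ===== Notes on version B (the rewrite author's own statement) =====
-- stated objective: simpler
-- what changed: Replaced the precomputed Lydia path list plus the pop/push stack loop with one direct forward pass that flips each 'E'/'S' while tracking the position, stopping at the far corner or at the first other character; A always materialises the whole position list while B does a single early-stopping scan.
import Mathlib
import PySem

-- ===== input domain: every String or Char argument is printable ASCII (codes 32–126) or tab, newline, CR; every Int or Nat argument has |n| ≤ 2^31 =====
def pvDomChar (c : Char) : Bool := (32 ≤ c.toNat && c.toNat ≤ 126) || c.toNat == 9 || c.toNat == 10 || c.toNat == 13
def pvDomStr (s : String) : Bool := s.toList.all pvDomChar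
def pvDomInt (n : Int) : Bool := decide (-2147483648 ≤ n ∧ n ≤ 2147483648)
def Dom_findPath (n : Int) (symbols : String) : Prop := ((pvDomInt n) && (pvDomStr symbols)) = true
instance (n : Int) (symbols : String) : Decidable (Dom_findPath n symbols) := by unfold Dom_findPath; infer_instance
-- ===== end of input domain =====

-- B drops findLydiaPath and the stack: one forward pass flipping E/S while tracking the position (objective: simpler).

-- ===== PORT A =====
-- Python strings are modelled as List Char; the while loop gets fuel (inside Pre_ the loop
-- runs at most symbols.length + 1 iterations, so the fuel below is never exhausted there).
-- for-loop body of findLydiaPath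
def findLydiaStep (st : Int × Int × List (Int × Int)) (c : Char) : Int × Int × List (Int × Int) :=
  let i := st.1; let j := st.2.1; let res := st.2.2
  let i := if c = 'E' then i + 1 else i
  let j := if c ≠ 'E' ∧ c = 'S' then j + 1 else j
  (i, j, res ++ [(i, j)])

def findLydiaPathA (symbols : List Char) : List (Int × Int) :=
  (symbols.foldl findLydiaStep (0, 0, [((0 : Int), (0 : Int))])).2.2

-- the while loop of findPath; stack top is the list head; where Python raises IndexError
-- (lydiaPath[count] or symbols[count] out of range — outside Pre_) the port returns res as is.
def findPathLoop (n : Int) (symbols : List Char) (lydiaPath : List (Int × Int))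
    (stack : List (Int × Int × List Char)) (res : List Char) (count : Nat) : Nat → List Char
  | 0 => res
  | fuel + 1 =>
    match stack with
    | [] => res
    | (i, j, c) :: rest =>
      let res := res ++ c
      if (i, j) = (n - 1, n - 1) then res
      else
        match PySem.List.pyGet? lydiaPath (count : Int) with
        | none => res  -- Python: IndexError
        | some p =>
          let stack :=
            if (i, j) = p then
              match PySem.List.pyGet? symbols (count : Int) with
              | none => none  -- Python: IndexError
              | some sc =>
                if sc = 'E' then some ((i + 1, j, ['S']) :: rest)
                else if sc = 'S' then some ((i, j + 1, ['E']) :: rest)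
                else some rest
            else some ((i, j + 1, ['E']) :: (i + 1, j, ['S']) :: rest)
          match stack with
          | none => res  -- Python: IndexError
          | some stack => findPathLoop n symbols lydiaPath stack res (count + 1) fuel

def findPath (n : Int) (symbols : String) : String :=
  let s := symbols.toList
  let lydiaPath := findLydiaPathA s
  String.ofList (findPathLoop n s lydiaPath [(0, 0, [])] [] 0 (s.length + 2))

-- ===== PORT B =====
-- the for loop of B: out is the accumulator list, (i, j) the tracked position
def findPathAltLoop (n : Int) (i j : Int) (cs : List Char) (out : List Char) : List Char :=
  match cs with
  | [] => out
  | c :: rest =>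
    if c = 'E' then
      let i := i + 1
      let out := out ++ ['S']
      if (i, j) = (n - 1, n - 1) then out else findPathAltLoop n i j rest out
    else if c = 'S' then
      let j := j + 1
      let out := out ++ ['E']
      if (i, j) = (n - 1, n - 1) then out else findPathAltLoop n i j rest out
    else out

def findPath_alt (n : Int) (symbols : String) : String :=
  if ((0 : Int), (0 : Int)) = (n - 1, n - 1) then ""
  else String.ofList (findPathAltLoop n 0 0 symbols.toList [])

-- ===== PRECONDITION & SPEC =====
-- Pre_ excludes exactly the inputs on which Python A raises IndexError: n ≠ 1, all characters
-- are 'E'/'S' and no prefix of the walk reaches (n-1, n-1), so A indexes symbols past its end.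
def Pre_findPath (n : Int) (symbols : String) : Prop :=
  n = 1 ∨ (symbols.toList.any (fun c => !(c == 'E') && !(c == 'S'))) = true ∨
  ∃ k ∈ List.range (symbols.toList.length + 1),
    ((symbols.toList.take k).count 'E' : Int) = n - 1 ∧
    ((symbols.toList.take k).count 'S' : Int) = n - 1

instance (n : Int) (symbols : String) : Decidable (Pre_findPath n symbols) := by
  unfold Pre_findPath; infer_instance

def pvWitness_findPath : Int × String := (3, "ESSEXE")

def Spec_findPath (n : Int) (symbols : String) (out : String) : Prop := out = findPath_alt n symbols
instance (n : Int) (symbols : String) (out : String) : Decidable (Spec_findPath n symbols out) := by unfold Spec_findPath; infer_instance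

-- ===== CLAIM (what is proved, stated in full; the proofs are below) =====
def Claim_equal_findPath : Prop := ∀ (n : Int) (symbols : String), Dom_findPath n symbols → Pre_findPath n symbols → Spec_findPath n symbols (findPath n symbols)

-- ===== LEMMAS AND PROOFS =====

-- accumulator lemma for B's loop
theorem findPathAltLoop_out (n i j : Int) (cs out : List Char) :
    findPathAltLoop n i j cs out = out ++ findPathAltLoop n i j cs [] := by
  induction cs generalizing i j out with
  | nil => simp [findPathAltLoop]
  | cons c rest ih =>
    simp only [findPathAltLoop]
    split_ifs
    all_goals try simp only [List.nil_append]
    all_goals first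
        | simp
        | (rw [ih (i+1) j (out ++ ['S']), ih (i+1) j ['S']]; simp)
        | (rw [ih i (j+1) (out ++ ['E']), ih i (j+1) ['E']]; simp)

-- spec of the findLydiaPath fold: the list of positions after each prefix
def posList (i j : Int) : List Char → List (Int × Int)
  | [] => []
  | c :: cs =>
    let i' := if c = 'E' then i + 1 else i
    let j' := if c ≠ 'E' ∧ c = 'S' then j + 1 else j
    (i', j') :: posList i' j' cs

theorem findLydiaStep_fold (cs : List Char) : ∀ (i j : Int) (acc : List (Int × Int)),
    (cs.foldl findLydiaStep (i, j, acc)).2.2 = acc ++ posList i j cs := by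
  induction cs with
  | nil => intro i j acc; simp [posList]
  | cons c cs ih =>
    intro i j acc
    simp only [List.foldl_cons, findLydiaStep, posList]
    rw [ih]
    simp

theorem posList_get (cs : List Char) : ∀ (i j : Int) (k : Nat), k ≤ cs.length →
    (((i, j) :: posList i j cs)[k]? : Option (Int × Int))
      = some (i + ((cs.take k).count 'E' : Nat), j + ((cs.take k).count 'S' : Nat)) := by
  induction cs with
  | nil =>
    intro i j k hk
    simp only [List.length_nil, Nat.le_zero] at hk
    subst hk
    simp
  | cons c cs ih =>
    intro i j k hk
    cases k with
    | zero => simp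
    | succ k =>
      simp only [posList, List.getElem?_cons_succ, List.take_succ_cons, List.count_cons]
      rw [ih _ _ k (by simpa using hk)]
      by_cases hE : c = 'E' <;> by_cases hS : c = 'S' <;>
        simp [hE, hS] <;> ring_nf

theorem lydia_get (xs : List Char) (k : Nat) (hk : k ≤ xs.length) :
    PySem.List.pyGet? (findLydiaPathA xs) (k : Int)
      = some ((((xs.take k).count 'E' : Nat) : Int), (((xs.take k).count 'S' : Nat) : Int)) := by
  have h : findLydiaPathA xs = ((0 : Int), (0 : Int)) :: posList 0 0 xs := by
    simp [findLydiaPathA, findLydiaStep_fold]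
  rw [h, PySem.List.pyGet?_natCast, posList_get xs 0 0 k hk]
  simp

-- main invariant: A's loop on a singleton stack equals B's loop
theorem loop_eq (n : Int) (xs : List Char) :
    ∀ (rest pre : List Char) (i j : Int) (s res : List Char) (fuel : Nat),
      xs = pre ++ rest → i = ((pre.count 'E' : Nat) : Int) → j = ((pre.count 'S' : Nat) : Int) →
      (i, j) ≠ (n - 1, n - 1) → rest.length + 1 ≤ fuel →
      findPathLoop n xs (findLydiaPathA xs) [(i, j, s)] res pre.length fuel
        = res ++ s ++ findPathAltLoop n i j rest [] := by
  intro rest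
  induction rest with
  | nil =>
    intro pre i j s res fuel hxs hi hj hc hf
    obtain ⟨f, rfl⟩ : ∃ f, fuel = f + 1 := ⟨fuel - 1, by omega⟩
    have hget : PySem.List.pyGet? (findLydiaPathA xs) ((pre.length : Nat) : Int)
        = some (i, j) := by
      rw [lydia_get xs pre.length (by simp [hxs]), hxs]
      simp [hi, hj]
    have hsym : PySem.List.pyGet? xs ((pre.length : Nat) : Int) = none := by
      rw [hxs, PySem.List.pyGet?_natCast]
      simp
    simp [findPathLoop, hc, hget, hsym, findPathAltLoop]
  | cons c rest ih =>
    intro pre i j s res fuel hxs hi hj hc hf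
    obtain ⟨f, rfl⟩ : ∃ f, fuel = f + 1 := ⟨fuel - 1, by omega⟩
    have hget : PySem.List.pyGet? (findLydiaPathA xs) ((pre.length : Nat) : Int)
        = some (i, j) := by
      rw [lydia_get xs pre.length (by simp [hxs])]
      rw [hxs, List.take_left]   -- wait take pre.length of pre++(c::rest) = pre
      simp [hi, hj]
    have hsym : PySem.List.pyGet? xs ((pre.length : Nat) : Int) = some c := by
      rw [hxs]; exact PySem.List.pyGet?_append_length pre rest c
    by_cases hcE : c = 'E'
    · subst hcE
      by_cases hcorn : ((i + 1, j) : Int × Int) = (n - 1, n - 1)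
      · -- next pop reaches the corner: unfold two steps
        obtain ⟨f', rfl⟩ : ∃ f', f = f' + 1 := ⟨f - 1, by simp at hf; omega⟩
        simp [findPathLoop, hc, hget, hsym, hcorn, findPathAltLoop]
      · have := ih (pre ++ ['E']) (i + 1) j ['S'] (res ++ s) f
          (by simp [hxs]) (by simp [hi, List.count_append])
          (by simp [hj, List.count_append])
          hcorn (by simp at hf ⊢; omega)
        have hlen : (pre ++ ['E']).length = pre.length + 1 := by simp
        rw [hlen] at this
        simp [findPathLoop, hc, hget, hsym, hcorn, findPathAltLoop]
        rw [this, findPathAltLoop_out n (i+1) j rest ['S']]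
        simp
    · by_cases hcS : c = 'S'
      · subst hcS
        by_cases hcorn : ((i, j + 1) : Int × Int) = (n - 1, n - 1)
        · obtain ⟨f', rfl⟩ : ∃ f', f = f' + 1 := ⟨f - 1, by simp at hf; omega⟩
          simp [findPathLoop, hc, hget, hsym, hcorn, findPathAltLoop]
        · have := ih (pre ++ ['S']) i (j + 1) ['E'] (res ++ s) f
            (by simp [hxs]) (by simp [hi, List.count_append])
            (by simp [hj, List.count_append])
            hcorn (by simp at hf ⊢; omega)
          have hlen : (pre ++ ['S']).length = pre.length + 1 := by simp
          rw [hlen] at this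
          simp [findPathLoop, hc, hget, hsym, hcorn, findPathAltLoop]
          rw [this, findPathAltLoop_out n i (j+1) rest ['E']]
          simp
      · -- neither 'E' nor 'S': stack becomes empty, both stop
        obtain ⟨f', rfl⟩ : ∃ f', f = f' + 1 := ⟨f - 1, by simp at hf; omega⟩
        simp [findPathLoop, hc, hget, hsym, hcE, hcS, findPathAltLoop]

-- ===== VERDICT (by name: the statement is the Claim_ definition above) =====
theorem findPath_spec : Claim_equal_findPath := by
  intro n symbols _ _
  unfold Spec_findPath findPath findPath_alt
  by_cases h : ((0 : Int), (0 : Int)) = (n - 1, n - 1)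
  · dsimp only
    simp [findPathLoop, h]
  · rw [if_neg h]
    dsimp only
    have := loop_eq n symbols.toList symbols.toList [] 0 0 [] []
      (symbols.toList.length + 2) (by simp) (by simp) (by simp) h (by omega)
    simp only [List.length_nil, List.nil_append] at this
    rw [this]
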